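-- pv_equiv track=rewrite | github.com/jereneal20/cnf | cnf/MiniSATCaller.py | getMiniSATString
-- ===== SOURCE A (Python) =====
-- def getMiniSATString(infixForm, varDictionary):
-- 	minisatStr = "c convert to CNF\np cnf " + str(len(varDictionary))
-- 	minisatContent = ""
-- 	iterNum = 1
-- 	for token in infixForm.split():
-- 		if token in varDictionary:
-- 			minisatContent += str(varDictionary[token]) + " "
-- 		if token == "&":
-- 			minisatContent += "0\n"
-- 			iterNum += 1
-- 		if token == "-":
-- 			minisatContent += "-"
-- 	minisatContent += "0"
-- 	minisatStr += " " + str(iterNum) + "\n" + minisatContent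
-- 	return minisatStr
-- ===== SOURCE B (Python) =====
-- def getMiniSATString(infixForm, varDictionary):
--     # Split tokens into clause groups at each '&' separator, render each clause,
--     # then join the clause strings with the "0\n" terminator.
--     clauses = [[]]
--     for token in infixForm.split():
--         if token == "&":
--             clauses.append([])
--         else:
--             clauses[-1].append(token)
--     parts = []
--     for clause in clauses:
--         s = ""
--         for token in clause:
--             if token in varDictionary:
--                 s += str(varDictionary[token]) + " "
--             if token == "-":
--                 s += "-"
--         parts.append(s)
--     return ("c convert to CNF\np cnf " + str(len(varDictionary)) + " "
--             + str(len(clauses)) + "\n" + "0\n".join(parts) + "0")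
-- ===== Notes on version B (the rewrite author's own statement) =====
-- stated objective: alternative
-- what changed: B splits the token list into clause groups at each '&' first and renders each clause separately, joining the clause strings with the '0\n' terminator, instead of A's single pass that accumulates one content string and a clause counter together.
-- intended difference: On inputs whose token list contains '&' while '&' is also a key of varDictionary, A emits the '&' variable's value before each clause terminator (treating the token as both a variable and a separator); B treats '&' purely as the clause separator, which is the intended CNF output. — e.g. on getMiniSATString("x & x", [("&", 2), ("x", 1)]): A returns "c convert to CNF\np cnf 2 2\n1 2 0\n1 0", B returns "c convert to CNF\np cnf 2 2\n1 0\n1 0"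
import Mathlib
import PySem

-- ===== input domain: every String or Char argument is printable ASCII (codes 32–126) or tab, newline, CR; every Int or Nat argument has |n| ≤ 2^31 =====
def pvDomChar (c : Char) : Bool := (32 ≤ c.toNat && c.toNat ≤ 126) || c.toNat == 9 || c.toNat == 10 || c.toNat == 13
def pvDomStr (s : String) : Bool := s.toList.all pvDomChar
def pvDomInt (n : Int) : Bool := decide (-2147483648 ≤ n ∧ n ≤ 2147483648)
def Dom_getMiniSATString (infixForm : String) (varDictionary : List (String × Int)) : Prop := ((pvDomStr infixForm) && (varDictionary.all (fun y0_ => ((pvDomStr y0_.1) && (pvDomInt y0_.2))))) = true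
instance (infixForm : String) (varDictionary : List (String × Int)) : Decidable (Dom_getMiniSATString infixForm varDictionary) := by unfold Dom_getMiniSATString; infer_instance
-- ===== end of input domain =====

-- B rebuilds the output clause-by-clause (split the token list at '&', render each clause, join with the
-- "0\n" terminator) instead of A's single stateful accumulation; objective: alternative decomposition.

-- ===== PORT A =====
-- one loop step of A's for-loop (the three independent ifs, in A's order), over the state (minisatContent, iterNum)
def pvStepA (d : PySem.Dict String Int) (st : String × Int) (token : String) : String × Int :=
  let st := match PySem.Dict.get? d token with
    | some v => (st.1 ++ PySem.Int.toStr v ++ " ", st.2)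
    | none => st
  let st := if token == "&" then (st.1 ++ "0\n", st.2 + 1) else st
  if token == "-" then (st.1 ++ "-", st.2) else st

def getMiniSATString (infixForm : String) (varDictionary : List (String × Int)) : String :=
  let d := PySem.Dict.ofList varDictionary
  let minisatStr := "c convert to CNF\np cnf " ++ PySem.Int.toStr (PySem.Dict.size d)
  let st := (PySem.Str.split₀ infixForm).foldl (pvStepA d) ("", 1)
  let minisatContent := st.1 ++ "0"
  minisatStr ++ " " ++ PySem.Int.toStr st.2 ++ "\n" ++ minisatContent

-- ===== PORT B =====
-- one step of B's clause-splitting loop: '&' opens a new clause, any other token joins the current one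
-- (clauses kept in reverse, current clause reversed, mirroring Python's append-at-end)
def pvClauseSplitStep (cls : List (List String)) (token : String) : List (List String) :=
  if token == "&" then [] :: cls
  else match cls with
    | c :: cs => (token :: c) :: cs
    | [] => [[token]]

-- one step of B's inner per-clause loop (the two independent ifs)
def pvLitStep (d : PySem.Dict String Int) (s : String) (token : String) : String :=
  let s := match PySem.Dict.get? d token with
    | some v => s ++ PySem.Int.toStr v ++ " "
    | none => s
  if token == "-" then s ++ "-" else s

def pvClauseStr (d : PySem.Dict String Int) (clause : List String) : String :=
  clause.foldl (pvLitStep d) ""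

def getMiniSATString_alt (infixForm : String) (varDictionary : List (String × Int)) : String :=
  let d := PySem.Dict.ofList varDictionary
  let clausesRev := (PySem.Str.split₀ infixForm).foldl pvClauseSplitStep [[]]
  let clauses := (clausesRev.map List.reverse).reverse
  let parts := clauses.map (pvClauseStr d)
  "c convert to CNF\np cnf " ++ PySem.Int.toStr (PySem.Dict.size d) ++ " "
    ++ PySem.Int.toStr (clauses.length : Int) ++ "\n" ++ PySem.Str.join "0\n" parts ++ "0"

-- ===== PRECONDITION & SPEC =====
-- On inputs whose token list contains '&' while '&' is also a key of varDictionary, A treats the same token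
-- as both a variable and a clause separator and emits its value before the clause terminator; B treats '&'
-- purely as the separator, which is the intended CNF output.
def D_getMiniSATString (infixForm : String) (varDictionary : List (String × Int)) : Prop :=
  "&" ∈ PySem.Str.split₀ infixForm ∧ varDictionary.any (fun p => p.1 == "&") = true
instance (infixForm : String) (varDictionary : List (String × Int)) : Decidable (D_getMiniSATString infixForm varDictionary) := by unfold D_getMiniSATString; infer_instance

def Spec_getMiniSATString (infixForm : String) (varDictionary : List (String × Int)) (out : String) : Prop := ¬ D_getMiniSATString infixForm varDictionary → out = getMiniSATString_alt infixForm varDictionary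
instance (infixForm : String) (varDictionary : List (String × Int)) (out : String) : Decidable (Spec_getMiniSATString infixForm varDictionary out) := by unfold Spec_getMiniSATString; infer_instance

def pvDiffWitness_getMiniSATString : String × (List (String × Int)) := ("x & x", [("&", 2), ("x", 1)])
def pvDiffWitnessOut_getMiniSATString : String × String :=
  ("c convert to CNF\np cnf 2 2\n1 2 0\n1 0", "c convert to CNF\np cnf 2 2\n1 0\n1 0")

-- ===== CLAIM (what is proved, stated in full; the proofs are below) =====
def Claim_unchanged_getMiniSATString : Prop := ∀ (infixForm : String) (varDictionary : List (String × Int)), Dom_getMiniSATString infixForm varDictionary → Spec_getMiniSATString infixForm varDictionary (getMiniSATString infixForm varDictionary)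
def Claim_exact_getMiniSATString : Prop := ∀ (infixForm : String) (varDictionary : List (String × Int)), Dom_getMiniSATString infixForm varDictionary → D_getMiniSATString infixForm varDictionary → getMiniSATString infixForm varDictionary ≠ getMiniSATString_alt infixForm varDictionary
def Claim_changed_getMiniSATString : Prop := Dom_getMiniSATString (pvDiffWitness_getMiniSATString.1) (pvDiffWitness_getMiniSATString.2) ∧ D_getMiniSATString (pvDiffWitness_getMiniSATString.1) (pvDiffWitness_getMiniSATString.2) ∧ getMiniSATString (pvDiffWitness_getMiniSATString.1) (pvDiffWitness_getMiniSATString.2) = pvDiffWitnessOut_getMiniSATString.1 ∧ getMiniSATString_alt (pvDiffWitness_getMiniSATString.1) (pvDiffWitness_getMiniSATString.2) = pvDiffWitnessOut_getMiniSATString.2 ∧ pvDiffWitnessOut_getMiniSATString.1 ≠ pvDiffWitnessOut_getMiniSATString.2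

-- ===== LEMMAS AND PROOFS =====

-- recursive description of B's clause split, used only by the proofs
def pvSplitRec : List String → List (List String)
  | [] => [[]]
  | t :: rest =>
    if t == "&" then [] :: pvSplitRec rest
    else match pvSplitRec rest with
      | c :: cs => (t :: c) :: cs
      | [] => [[t]]

theorem pvSplitRec_ne_nil (l : List String) : pvSplitRec l ≠ [] := by
  cases l with
  | nil => simp [pvSplitRec]
  | cons t rest =>
    simp only [pvSplitRec]
    split
    · simp
    · split <;> simp

def pvPrepend (x : List String) : List (List String) → List (List String)
  | c :: cs => (x ++ c) :: cs
  | [] => [x]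

theorem pvPrepend_nil {l : List (List String)} (h : l ≠ []) : pvPrepend [] l = l := by
  cases l with
  | nil => exact absurd rfl h
  | cons c cs => simp [pvPrepend]

theorem pvFold_split_eq (toks : List String) : ∀ (c : List String) (cs : List (List String)),
    ((toks.foldl pvClauseSplitStep (c :: cs)).map List.reverse).reverse
      = (cs.map List.reverse).reverse ++ pvPrepend c.reverse (pvSplitRec toks) := by
  induction toks with
  | nil => intro c cs; simp [pvSplitRec, pvPrepend]
  | cons t rest ih =>
    intro c cs
    by_cases ht : t == "&"
    · simp only [List.foldl_cons, pvClauseSplitStep, if_pos ht, pvSplitRec, ih]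
      cases h : pvSplitRec rest with
      | nil => exact absurd h (pvSplitRec_ne_nil rest)
      | cons c' cs' => simp [pvPrepend]
    · simp only [List.foldl_cons, pvClauseSplitStep, if_neg ht, pvSplitRec, ih]
      cases h : pvSplitRec rest with
      | nil => exact absurd h (pvSplitRec_ne_nil rest)
      | cons c' cs' => simp [pvPrepend]

theorem pvClauses_eq (toks : List String) :
    ((toks.foldl pvClauseSplitStep [[]]).map List.reverse).reverse = pvSplitRec toks := by
  have := pvFold_split_eq toks [] []
  simpa [pvPrepend_nil (pvSplitRec_ne_nil toks)] using this

theorem pvSplitRec_length (toks : List String) :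
    (pvSplitRec toks).length = toks.count "&" + 1 := by
  induction toks with
  | nil => simp [pvSplitRec]
  | cons t rest ih =>
    by_cases ht : t == "&"
    · have ht' : t = "&" := by simpa using ht
      simp [pvSplitRec, ht', ih]
    · have ht' : ¬ t = "&" := by simpa using ht
      cases h : pvSplitRec rest with
      | nil => exact absurd h (pvSplitRec_ne_nil rest)
      | cons c cs =>
        simp only [pvSplitRec, if_neg ht, h]
        simp only [h, List.length_cons] at ih
        simp [ht', ih]

theorem pvLitStep_split (d : PySem.Dict String Int) (s t : String) :
    pvLitStep d s t = s ++ pvLitStep d "" t := by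
  unfold pvLitStep
  cases PySem.Dict.get? d t <;> split_ifs <;> simp [String.append_assoc]

theorem pvClauseStr_cons_split (d : PySem.Dict String Int) (c : List String) : ∀ (s : String),
    c.foldl (pvLitStep d) s = s ++ pvClauseStr d c := by
  induction c with
  | nil => intro s; simp [pvClauseStr]
  | cons t c ih =>
    intro s
    simp only [List.foldl_cons, pvClauseStr]
    rw [ih, ih (pvLitStep d "" t), pvLitStep_split d s t, String.append_assoc]

theorem pvJoin_cons_cons (sep x y : String) (ys : List String) :
    PySem.Str.join sep (x :: y :: ys) = x ++ sep ++ PySem.Str.join sep (y :: ys) := by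
  simp [PySem.Str.join, PySem.Chars.join, List.intercalate, String.ofList_append,
    String.append_assoc]

theorem pvJoin_singleton (sep x : String) : PySem.Str.join sep [x] = x := by
  simp [PySem.Str.join, PySem.Chars.join, List.intercalate]

theorem pvJoin_head_append (sep a x : String) (xs : List String) :
    PySem.Str.join sep ((a ++ x) :: xs) = a ++ PySem.Str.join sep (x :: xs) := by
  cases xs with
  | nil => simp [pvJoin_singleton]
  | cons y ys => simp [pvJoin_cons_cons, String.append_assoc]

theorem pvMain (d : PySem.Dict String Int) (toks : List String) : ∀ (p : String) (n : Int),
    toks.foldl (pvStepA d) (p, n)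
      = (p ++ PySem.Str.join (pvLitStep d "" "&" ++ "0\n")
            ((pvSplitRec toks).map (pvClauseStr d)),
         n + (toks.count "&" : Int)) := by
  induction toks with
  | nil => intro p n; simp [pvSplitRec, pvJoin_singleton, pvClauseStr]
  | cons t rest ih =>
    intro p n
    by_cases ht : t = "&"
    · subst ht
      have hstep : pvStepA d (p, n) "&" = (p ++ (pvLitStep d "" "&" ++ "0\n"), n + 1) := by
        simp only [pvStepA, pvLitStep]
        cases PySem.Dict.get? d "&" <;> simp [String.append_assoc]
      rw [List.foldl_cons, hstep, ih]
      have hsplit : pvSplitRec ("&" :: rest) = [] :: pvSplitRec rest := by simp [pvSplitRec]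
      rw [hsplit]
      cases h : pvSplitRec rest with
      | nil => exact absurd h (pvSplitRec_ne_nil rest)
      | cons c cs =>
        simp only [List.map_cons, pvJoin_cons_cons, Prod.mk.injEq]
        constructor
        · simp [pvClauseStr, String.append_assoc]
        · simp; ring
    · have ht' : (t == "&") = false := by simpa using ht
      have hstep : pvStepA d (p, n) t = (pvLitStep d p t, n) := by
        simp only [pvStepA, pvLitStep, ht']
        cases PySem.Dict.get? d t <;> by_cases hd : (t == "-") = true <;> simp [hd]
      rw [List.foldl_cons, hstep, pvLitStep_split, ih]
      cases h : pvSplitRec rest with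
      | nil => exact absurd h (pvSplitRec_ne_nil rest)
      | cons c cs =>
        have hsplit : pvSplitRec (t :: rest) = (t :: c) :: cs := by
          simp [pvSplitRec, ht', h]
        rw [hsplit]
        simp only [Prod.mk.injEq]
        constructor
        · have h1 : pvClauseStr d (t :: c) = pvLitStep d "" t ++ pvClauseStr d c := by
            simp only [pvClauseStr, List.foldl_cons]
            rw [pvClauseStr_cons_split d c (pvLitStep d "" t)]
            rfl
          simp only [List.map_cons]
          rw [h1, pvJoin_head_append, String.append_assoc]
        · simp [ht]

theorem pvContains_foldl (l : List (String × Int)) : ∀ (d : PySem.Dict String Int) (k : String),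
    (l.foldl (fun acc p => acc.insert p.1 p.2) d).contains k
      = (d.contains k || l.any (fun p => p.1 == k)) := by
  induction l with
  | nil => intro d k; simp
  | cons p l ih =>
    intro d k
    rw [List.foldl_cons, ih, PySem.Dict.contains_insert]
    simp [List.any_cons]
    cases d.contains k <;> cases h : k == p.1 <;> simp_all [BEq.comm]

theorem pvOfList_not_contains (l : List (String × Int)) (k : String)
    (h : l.any (fun p => p.1 == k) = false) : PySem.Dict.get? (PySem.Dict.ofList l) k = none := by
  have hc : ((PySem.Dict.ofList l).items.any (fun p => p.1 == k)) = false := by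
    have h2 := pvContains_foldl l PySem.Dict.empty k
    simp only [PySem.Dict.contains] at h2
    simpa [PySem.Dict.ofList, PySem.Dict.update, PySem.Dict.empty, h] using h2
  rw [List.any_eq_false] at hc
  simp only [PySem.Dict.get?]
  rw [List.find?_eq_none.mpr hc]
  rfl

-- ===== VERDICT (by name: the statement is the Claim_ definition above) =====
theorem pvOfList_contains_some (l : List (String × Int)) (k : String)
    (h : l.any (fun p => p.1 == k) = true) :
    ∃ v, PySem.Dict.get? (PySem.Dict.ofList l) k = some v := by
  have hc : ((PySem.Dict.ofList l).items.any (fun p => p.1 == k)) = true := by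
    have h2 := pvContains_foldl l PySem.Dict.empty k
    simp only [PySem.Dict.contains] at h2
    simpa [PySem.Dict.ofList, PySem.Dict.update, PySem.Dict.empty, h] using h2
  obtain ⟨x, hx, hpx⟩ := List.any_eq_true.mp hc
  have : (List.find? (fun p => p.1 == k) (PySem.Dict.ofList l).items).isSome = true :=
    List.find?_isSome.mpr ⟨x, hx, hpx⟩
  obtain ⟨a, ha⟩ := Option.isSome_iff_exists.mp this
  exact ⟨a.2, by simp [PySem.Dict.get?, ha]⟩

theorem pvJoin_len_lt (s1 s2 : String) (h : s2.toList.length < s1.toList.length) :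
    ∀ (ys : List String) (y x : String),
    (PySem.Str.join s2 (x :: y :: ys)).toList.length
      < (PySem.Str.join s1 (x :: y :: ys)).toList.length := by
  intro ys
  induction ys with
  | nil =>
    intro y x
    simp only [pvJoin_cons_cons, pvJoin_singleton, String.toList_append, List.length_append]
    omega
  | cons z zs ih =>
    intro y x
    rw [pvJoin_cons_cons s1, pvJoin_cons_cons s2]
    have := ih z y
    simp only [String.toList_append, List.length_append]
    omega

-- ===== VERDICT (by name: the statement is the Claim_ definition above) =====
theorem getMiniSATString_spec : Claim_unchanged_getMiniSATString := by
  intro infixForm varDictionary _ hnd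
  have key := pvMain (PySem.Dict.ofList varDictionary) (PySem.Str.split₀ infixForm) "" 1
  have hcl := pvClauses_eq (PySem.Str.split₀ infixForm)
  have hcast : (1 : Int) + ((PySem.Str.split₀ infixForm).count "&" : Int)
      = (((PySem.Str.split₀ infixForm).count "&" + 1 : Nat) : Int) := by push_cast; ring
  have hj : PySem.Str.join (pvLitStep (PySem.Dict.ofList varDictionary) "" "&" ++ "0\n")
        ((pvSplitRec (PySem.Str.split₀ infixForm)).map (pvClauseStr (PySem.Dict.ofList varDictionary)))
      = PySem.Str.join "0\n"
        ((pvSplitRec (PySem.Str.split₀ infixForm)).map (pvClauseStr (PySem.Dict.ofList varDictionary))) := by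
    by_cases hmem : "&" ∈ PySem.Str.split₀ infixForm
    · have hget : PySem.Dict.get? (PySem.Dict.ofList varDictionary) "&" = none := by
        refine pvOfList_not_contains varDictionary "&" (Bool.eq_false_iff.mpr ?_)
        intro hany
        exact hnd ⟨hmem, hany⟩
      simp [pvLitStep, hget]
    · have hcount : (PySem.Str.split₀ infixForm).count "&" = 0 := by
        simpa using List.count_eq_zero.mpr hmem
      have hlen := pvSplitRec_length (PySem.Str.split₀ infixForm)
      rw [hcount] at hlen
      cases h : pvSplitRec (PySem.Str.split₀ infixForm) with
      | nil => exact absurd h (pvSplitRec_ne_nil _)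
      | cons c cs =>
        rw [h] at hlen
        have : cs = [] := by
          cases cs with
          | nil => rfl
          | cons c2 cs2 => simp at hlen
        subst this
        simp [pvJoin_singleton]
  simp only [getMiniSATString, getMiniSATString_alt, key, hcl, pvSplitRec_length, hcast, hj]
  simp [String.append_assoc]

theorem getMiniSATString_changed : Claim_changed_getMiniSATString := by
  unfold Claim_changed_getMiniSATString; decide

theorem getMiniSATString_tight : Claim_exact_getMiniSATString := by
  intro infixForm varDictionary _ hD hEq
  obtain ⟨hmem, hany⟩ := hD
  obtain ⟨v, hv⟩ := pvOfList_contains_some varDictionary "&" hany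
  have key := pvMain (PySem.Dict.ofList varDictionary) (PySem.Str.split₀ infixForm) "" 1
  have hcl := pvClauses_eq (PySem.Str.split₀ infixForm)
  have hcast : (1 : Int) + ((PySem.Str.split₀ infixForm).count "&" : Int)
      = (((PySem.Str.split₀ infixForm).count "&" + 1 : Nat) : Int) := by push_cast; ring
  simp only [getMiniSATString, getMiniSATString_alt, key, hcl, pvSplitRec_length, hcast] at hEq
  -- the two outputs share the whole header; compare the joined bodies by length
  have hparts : 2 ≤ ((pvSplitRec (PySem.Str.split₀ infixForm)).map
      (pvClauseStr (PySem.Dict.ofList varDictionary))).length := by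
    have h1 := pvSplitRec_length (PySem.Str.split₀ infixForm)
    have h2 := List.count_pos_iff.mpr hmem
    simp only [List.length_map, h1]
    omega
  have hsep : ("0\n" : String).toList.length
      < (pvLitStep (PySem.Dict.ofList varDictionary) "" "&" ++ "0\n").toList.length := by
    have : pvLitStep (PySem.Dict.ofList varDictionary) "" "&"
        = "" ++ PySem.Int.toStr v ++ " " := by
      simp [pvLitStep, hv]
    rw [this]
    have l1 : (" " : String).toList.length = 1 := rfl
    have l2 : ("0\n" : String).toList.length = 2 := rfl
    simp only [String.toList_append, List.length_append]
    omega
  have hlt : ∀ (x y : String) (ys : List String),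
      (pvSplitRec (PySem.Str.split₀ infixForm)).map
          (pvClauseStr (PySem.Dict.ofList varDictionary)) = x :: y :: ys →
      False := by
    intro x y ys hp
    have hjoin := pvJoin_len_lt (pvLitStep (PySem.Dict.ofList varDictionary) "" "&" ++ "0\n")
      "0\n" hsep ys y x
    rw [hp] at hEq
    have h2 := congrArg (fun s => s.toList.length) hEq
    simp only [String.toList_append, List.length_append] at h2
    omega
  cases hp : (pvSplitRec (PySem.Str.split₀ infixForm)).map
      (pvClauseStr (PySem.Dict.ofList varDictionary)) with
  | nil => rw [hp] at hparts; simp at hparts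
  | cons x xs =>
    cases xs with
    | nil => rw [hp] at hparts; simp at hparts
    | cons y ys => exact hlt x y ys hp
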